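-- pv_equiv track=rewrite | github.com/collinforsyth/aoc2025 | day03/solution.py | part1
-- ===== SOURCE A (Python) =====
-- from typing import List
--
-- def part1(data: List[str]) -> int:
--     result = 0
--     for line in data:
--         first, idx = 0, 0
--         for i, c in enumerate(line[:-1]):
--             val = int(c)
--             if first < val:
--                 first, idx = val, i
--         second = 0
--         for v in line[idx + 1 :]:
--             second = max(second, int(v))
--         result += (first * 10) + second
--     return result
-- ===== SOURCE B (Python) =====
-- from typing import List
--
--
-- def part1(data: List[str]) -> int:
--     # Per line, the answer equals the maximum of d[i]*10 + d[j] over all index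
--     # pairs i < j (the *10 weight makes the greedy first-max choice optimal),
--     # computed in one right-to-left pass carrying the running suffix maximum.
--     total = 0
--     for line in data:
--         if len(line) < 2:
--             continue  # no pair of digits possible
--         it = reversed(line)
--         suf = int(next(it))
--         best = 0
--         for c in it:
--             v = int(c)
--             best = max(best, v * 10 + suf)
--             if v > suf:
--                 suf = v
--         total += best
--     return total
-- ===== Notes on version B (the rewrite author's own statement) =====
-- stated objective: alternative
-- what changed: A greedily finds the max digit of the prefix, its first index, and the max digit after it; B instead computes, per line, the maximum of d[i]*10 + d[j] over all pairs i < j in a single right-to-left pass carrying a running suffix maximum (correct because the *10 weight makes the greedy choice optimal for digits 0-9), skipping lines shorter than 2.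
import Mathlib
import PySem

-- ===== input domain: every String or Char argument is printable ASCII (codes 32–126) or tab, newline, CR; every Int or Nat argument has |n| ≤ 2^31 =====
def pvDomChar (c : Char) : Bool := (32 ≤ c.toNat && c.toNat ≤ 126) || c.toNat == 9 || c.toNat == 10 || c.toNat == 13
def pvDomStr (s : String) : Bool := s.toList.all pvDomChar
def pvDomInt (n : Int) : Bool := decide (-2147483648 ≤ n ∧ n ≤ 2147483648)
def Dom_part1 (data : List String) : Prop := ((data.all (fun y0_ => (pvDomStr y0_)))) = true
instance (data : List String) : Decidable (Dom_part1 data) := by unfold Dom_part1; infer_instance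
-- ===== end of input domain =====

-- B replaces A's greedy three-quantity computation (max prefix digit, its first index,
-- max digit after it) by a different algorithm: the per-line value equals the maximum of
-- d[i]*10 + d[j] over all pairs i < j, computed in one right-to-left pass carrying the
-- running suffix maximum; objective: alternative (same asymptotic cost).

-- int(c) for a single character c; exact when c is a decimal digit (Pre_ guarantees
-- that every character either program actually parses is a digit).
def pyDigit (c : Char) : Int := (c.toNat : Int) - 48

-- ===== PORT A =====
def part1 (data : List String) : Int :=
  data.foldl (fun result line =>
    let cs := line.toList
    -- first, idx = 0, 0; for i, c in enumerate(line[:-1]): ...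
    let p := (PySem.List.enumerate (PySem.List.slice cs none (some (-1))) 0).foldl
      (fun (s : Int × Int) ic => if s.1 < pyDigit ic.2 then (pyDigit ic.2, ic.1) else s) (0, 0)
    -- second = 0; for v in line[idx + 1:]: second = max(second, int(v))
    let second := (PySem.List.slice cs (some (p.2 + 1)) none).foldl
      (fun s v => max s (pyDigit v)) 0
    result + (p.1 * 10 + second)) 0

-- ===== PORT B =====
-- reversed(line) with the first element taken by next(...) becomes a match on
-- line.toList.reverse; the loop state is the pair (suf, best).
def part1_alt (data : List String) : Int :=
  data.foldl (fun total line =>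
    let cs := line.toList
    if cs.length < 2 then total        -- no pair of digits possible: skip
    else
      match cs.reverse with
      | [] => total                    -- unreachable: length ≥ 2
      | x :: rest =>
        total + (rest.foldl (fun (p : Int × Int) c =>
            let v := pyDigit c
            (if v > p.1 then v else p.1, max p.2 (v * 10 + p.1))) (pyDigit x, 0)).2) 0

-- ===== PRECONDITION & SPEC =====
-- Pre_ is exactly A's non-raising domain: in any line of length ≥ 2 every character must be a
-- decimal digit (A calls int on every character of line[:-1] and of line[idx+1:], which together
-- reach every character whenever the line has ≥ 2 characters); lines of length ≤ 1 are never
-- parsed by A, so they may contain anything.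
def Pre_part1 (data : List String) : Prop :=
  (data.all (fun l => l.toList.length ≤ 1 || l.toList.all Char.isDigit)) = true
instance (data : List String) : Decidable (Pre_part1 data) := by unfold Pre_part1; infer_instance

def pvWitness_part1 : List String := ["987", "12", "x", ""]

def Spec_part1 (data : List String) (out : Int) : Prop := out = part1_alt data
instance (data : List String) (out : Int) : Decidable (Spec_part1 data out) := by unfold Spec_part1; infer_instance

-- ===== CLAIM (what is proved, stated in full; the proofs are below) =====
def Claim_equal_part1 : Prop := ∀ (data : List String), Dom_part1 data → Pre_part1 data → Spec_part1 data (part1 data)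

-- ===== LEMMAS AND PROOFS =====

-- the common per-line specification: max over pairs i < j of d i * 10 + d j, default 0
def pm : List Int → Int
  | [] => 0
  | [_] => 0
  | x :: y :: t => max (x * 10 + (y :: t).foldl max 0) (pm (y :: t))

-- A's value for a single line (the body of A's outer loop)
def lineValueA (line : String) : Int :=
  let cs := line.toList
  let p := (PySem.List.enumerate (PySem.List.slice cs none (some (-1))) 0).foldl
    (fun (s : Int × Int) ic => if s.1 < pyDigit ic.2 then (pyDigit ic.2, ic.1) else s) (0, 0)
  let second := (PySem.List.slice cs (some (p.2 + 1)) none).foldl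
    (fun s v => max s (pyDigit v)) 0
  p.1 * 10 + second

-- B's value for a single line (the body of B's outer loop)
def lineValueB (line : String) : Int :=
  let cs := line.toList
  if cs.length < 2 then 0
  else
    match cs.reverse with
    | [] => 0
    | x :: rest =>
      (rest.foldl (fun (p : Int × Int) c =>
          let v := pyDigit c
          (if v > p.1 then v else p.1, max p.2 (v * 10 + p.1))) (pyDigit x, 0)).2

-- B's inner loop in foldr form over Int values
def Fi (l : List Int) (z : Int) : Int × Int :=
  l.foldr (fun v p => (if v > p.1 then v else p.1, max p.2 (v * 10 + p.1))) (z, 0)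

theorem part1_eq_sum (data : List String) :
    part1 data = (data.map lineValueA).sum := by
  have h : part1 data = data.foldl (fun r l => r + lineValueA l) 0 := rfl
  rw [h, PySem.List.foldl_add]
  simp

theorem part1_alt_eq_sum (data : List String) :
    part1_alt data = (data.map lineValueB).sum := by
  have h : part1_alt data = data.foldl (fun r l => r + lineValueB l) 0 := by
    unfold part1_alt lineValueB
    congr 1
    funext total line
    dsimp only
    split_ifs with hlen
    · simp
    · cases line.toList.reverse with
      | nil => simp
      | cons x rest => rfl
  rw [h, PySem.List.foldl_add]
  simp

-- fold facts -----------------------------------------------------------------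

theorem foldl_max_max (l : List Int) (a : Int) : ∀ b, l.foldl max (max a b) = max a (l.foldl max b) := by
  induction l with
  | nil => intro b; rfl
  | cons v t ih =>
      intro b
      simp only [List.foldl_cons]
      rw [max_assoc, ih]

theorem foldl_max_nonneg (l : List Int) : 0 ≤ l.foldl max 0 :=
  (PySem.List.le_foldl_max l 0).1

theorem foldl_max_le (l : List Int) (h : ∀ v ∈ l, v ≤ 9) : l.foldl max 0 ≤ 9 := by
  induction l with
  | nil => simp
  | cons v t ih =>
      simp only [List.foldl_cons]
      rw [show max 0 v = max v 0 from max_comm 0 v, foldl_max_max]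
      have hv := h v (by simp)
      have ht := ih (fun w hw => h w (by simp [hw]))
      omega

theorem foldl_max_drop_le (l : List Int) (n : Nat) : (l.drop n).foldl max 0 ≤ l.foldl max 0 := by
  induction l generalizing n with
  | nil => simp
  | cons v t ih =>
      cases n with
      | zero => simp
      | succ m =>
          simp only [List.drop_succ_cons, List.foldl_cons]
          rw [show max 0 v = max v 0 from max_comm 0 v, foldl_max_max]
          have := ih m
          omega

-- a nonempty list of nonnegative values attains its running maximum from 0
theorem foldl_max_attained_int (l : List Int) (hne : l ≠ []) (hnn : ∀ v ∈ l, 0 ≤ v) :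
    ∃ v ∈ l, v = l.foldl max 0 := by
  induction l with
  | nil => exact absurd rfl hne
  | cons v t ih =>
      simp only [List.foldl_cons]
      rw [show max 0 v = max v 0 from max_comm 0 v, foldl_max_max]
      by_cases ht : t = []
      · subst ht
        exact ⟨v, by simp, by have := hnn v (by simp); simp; omega⟩
      · obtain ⟨w, hw, hweq⟩ := ih ht (fun x hx => hnn x (by simp [hx]))
        by_cases hc : v ≤ t.foldl max 0
        · exact ⟨w, by simp [hw], by omega⟩
        · exact ⟨v, by simp, by omega⟩

-- B's loop: first component is the running maximum --------------------------

theorem Fi_fst (l : List Int) (z : Int) : (Fi l z).1 = l.foldr max z := by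
  induction l with
  | nil => rfl
  | cons v t ih =>
      unfold Fi at ih ⊢
      simp only [List.foldr_cons, ih]
      have : (if v > t.foldr max z then v else t.foldr max z) = max v (t.foldr max z) := by
        split_ifs <;> omega
      rw [this]

theorem foldr_max_eq (l : List Int) (z : Int) (hz : 0 ≤ z) (hnn : ∀ v ∈ l, 0 ≤ v) :
    l.foldr max z = max ((l ++ [z]).foldl max 0) 0 := by
  induction l with
  | nil => simp; omega
  | cons v t ih =>
      simp only [List.foldr_cons, List.cons_append, List.foldl_cons]
      rw [ih (fun w hw => hnn w (by simp [hw]))]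
      rw [show max 0 v = max v 0 from max_comm 0 v, foldl_max_max]
      omega

-- B's loop computes pm ------------------------------------------------------

theorem Fi_snd (l : List Int) (z : Int) (hz : 0 ≤ z) (hnn : ∀ v ∈ l, 0 ≤ v) :
    (Fi l z).2 = pm (l ++ [z]) := by
  induction l with
  | nil => rfl
  | cons v t ih =>
      have hstep : Fi (v :: t) z
          = (if v > (Fi t z).1 then v else (Fi t z).1, max (Fi t z).2 (v * 10 + (Fi t z).1)) := rfl
      rw [hstep]
      have ih' := ih (fun w hw => hnn w (by simp [hw]))
      cases t with
      | nil =>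
          simp only [List.nil_append] at ih' ⊢
          show max (Fi [] z).2 (v * 10 + (Fi [] z).1) = pm [v, z]
          simp [Fi, pm]
          omega
      | cons y t' =>
          show max (Fi (y :: t') z).2 (v * 10 + (Fi (y :: t') z).1) = pm (v :: (y :: t') ++ [z])
          rw [ih', Fi_fst]
          have hfold := foldr_max_eq (y :: t') z hz (fun w hw => hnn w (by simp [hw]))
          have hnn2 : ∀ w ∈ (y :: t') ++ [z], 0 ≤ w := by
            intro w hw
            rcases List.mem_append.mp hw with h | h
            · exact hnn w (by simp [List.mem_cons.mp h])
            · simp at h; omega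
          have hpos := foldl_max_nonneg (((y :: t') ++ [z]))
          show max (pm ((y :: t') ++ [z])) (v * 10 + (y :: t').foldr max z)
              = pm (v :: (y :: t') ++ [z])
          have hpm : pm (v :: (y :: t') ++ [z])
              = max (v * 10 + ((y :: t') ++ [z]).foldl max 0) (pm ((y :: t') ++ [z])) := rfl
          rw [hpm, hfold]
          omega

-- A's greedy value equals pm ------------------------------------------------

theorem greedy_eq_pm (e : List Int) (z : Int) (hne : e ≠ [])
    (hbnd : ∀ v ∈ e, 0 ≤ v ∧ v ≤ 9) (hz0 : 0 ≤ z) (hz9 : z ≤ 9) :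
    (e.foldl max 0) * 10
      + ((e ++ [z]).drop (((e.findIdx? (fun v => v == e.foldl max 0)).getD 0) + 1)).foldl max 0
      = pm (e ++ [z]) := by
  induction e with
  | nil => exact absurd rfl hne
  | cons a e' ih =>
      have ha := hbnd a (by simp)
      have hM : (a :: e').foldl max 0 = max a (e'.foldl max 0) := by
        simp only [List.foldl_cons]
        rw [show max 0 a = max a 0 from max_comm 0 a, foldl_max_max]
      cases e' with
      | nil =>
          have hMa : ([a] : List Int).foldl max 0 = a := by simp; omega
          rw [hMa]
          have hidx : (([a] : List Int).findIdx? (fun v => v == a)).getD 0 = 0 := by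
            simp [List.findIdx?_cons]
          rw [hidx]
          show a * 10 + ([a, z].drop 1).foldl max 0 = pm [a, z]
          simp [pm]
          omega
      | cons y t =>
          set e' := y :: t with he'
          have hbnd' : ∀ v ∈ e', 0 ≤ v ∧ v ≤ 9 := fun v hv => hbnd v (by simp [hv])
          have ih' := ih (by simp [he']) hbnd'
          set M' := e'.foldl max 0 with hM'
          have hM'0 : 0 ≤ M' := foldl_max_nonneg e'
          by_cases hcase : M' ≤ a
          · -- a is the (first) maximum: index 0, second = max of everything after a
            have hMval : (a :: e').foldl max 0 = a := by rw [hM]; omega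
            rw [hMval]
            have hidx : ((a :: e').findIdx? (fun v => v == a)).getD 0 = 0 := by
              simp [List.findIdx?_cons]
            rw [hidx]
            have hdrop : ((a :: e' ++ [z]).drop 1) = e' ++ [z] := by simp
            show a * 10 + ((a :: e' ++ [z]).drop (0 + 1)).foldl max 0 = pm (a :: e' ++ [z])
            rw [show (0 + 1 : Nat) = 1 from rfl, hdrop]
            have hpm : pm (a :: e' ++ [z]) = max (a * 10 + (e' ++ [z]).foldl max 0) (pm (e' ++ [z])) := rfl
            rw [hpm, ← ih']
            have hdle := foldl_max_drop_le (e' ++ [z]) (((e'.findIdx? (fun v => v == M')).getD 0) + 1)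
            have hfull_nonneg := foldl_max_nonneg (e' ++ [z])
            omega
          · -- the maximum lies in e': the index shifts by one, second is unchanged
            push_neg at hcase
            have hMval : (a :: e').foldl max 0 = M' := by rw [hM]; omega
            rw [hMval]
            obtain ⟨w, hw, hweq⟩ := foldl_max_attained_int e' (by simp [he'])
              (fun v hv => (hbnd' v hv).1)
            have hsome : ∃ j, e'.findIdx? (fun v => v == M') = some j := by
              cases hfi : e'.findIdx? (fun v => v == M') with
              | none =>
                  have := List.findIdx?_eq_none_iff.mp hfi w hw
                  simp at this
                  exact absurd (hweq.trans hM'.symm) this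
              | some j => exact ⟨j, rfl⟩
            obtain ⟨j, hj⟩ := hsome
            have hane : (a == M') = false := by simp; omega
            have hidx : ((a :: e').findIdx? (fun v => v == M')).getD 0 = j + 1 := by
              simp [List.findIdx?_cons, hane, hj]
            rw [hidx]
            have hdrop : ((a :: e' ++ [z]).drop (j + 1 + 1)) = (e' ++ [z]).drop (j + 1) := by
              simp [List.drop_succ_cons]
            show M' * 10 + ((a :: e' ++ [z]).drop (j + 1 + 1)).foldl max 0 = pm (a :: e' ++ [z])
            rw [hdrop]
            have hIH : M' * 10 + ((e' ++ [z]).drop (j + 1)).foldl max 0 = pm (e' ++ [z]) := by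
              have : (e'.findIdx? (fun v => v == M')).getD 0 = j := by simp [hj]
              rw [← this]; exact ih'
            rw [hIH]
            have hpm : pm (a :: e' ++ [z]) = max (a * 10 + (e' ++ [z]).foldl max 0) (pm (e' ++ [z])) := rfl
            rw [hpm]
            have hfull_le : (e' ++ [z]).foldl max 0 ≤ 9 := by
              apply foldl_max_le
              intro v hv
              rcases List.mem_append.mp hv with h | h
              · exact (hbnd' v h).2
              · simp at h; omega
            have hdrop_nonneg := foldl_max_nonneg ((e' ++ [z]).drop (j + 1))
            have hpm_ge : pm (e' ++ [z]) = M' * 10 + ((e' ++ [z]).drop (j + 1)).foldl max 0 := hIH.symm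
            omega

-- A's fused loop characterisation (max and first index of the max) ----------

theorem findIdx_shift (x : Char) (xs : List Char) (M : Int) (hx : pyDigit x ≠ M)
    (hatt : ∃ c ∈ xs, pyDigit c = M) :
    ((((x :: xs).findIdx? (fun c => pyDigit c == M)).getD 0 : Nat) : Int)
      = 1 + (((xs.findIdx? (fun c => pyDigit c == M)).getD 0 : Nat) : Int) := by
  rw [List.findIdx?_cons]
  have hxf : (pyDigit x == M) = false := by simpa using hx
  simp only [hxf, Bool.false_eq_true, if_false]
  obtain ⟨c, hc, hceq⟩ := hatt
  cases hfi : xs.findIdx? (fun c => pyDigit c == M) with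
  | none => exact absurd (List.findIdx?_eq_none_iff.mp hfi c hc) (by simp [hceq])
  | some j => simp; omega

theorem foldl_max_of_le (t : List Int) (a : Int) (h : ∀ v ∈ t, v ≤ a) :
    t.foldl max a = a := by
  induction t with
  | nil => rfl
  | cons x xs ih =>
      have hx : max a x = a := by have := h x (by simp); omega
      simp only [List.foldl_cons, hx]
      exact ih (fun v hv => h v (by simp [hv]))

theorem foldl_max_attained (xs : List Char) (f0 : Int)
    (hM : f0 < xs.foldl (fun a c => max a (pyDigit c)) f0) :
    ∃ c ∈ xs, pyDigit c = xs.foldl (fun a c => max a (pyDigit c)) f0 := by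
  induction xs generalizing f0 with
  | nil => simp at hM
  | cons y ys ih =>
      simp only [List.foldl_cons] at hM ⊢
      by_cases hy2 : max f0 (pyDigit y) < ys.foldl (fun a c => max a (pyDigit c)) (max f0 (pyDigit y))
      · obtain ⟨c, hc, hceq⟩ := ih _ hy2
        exact ⟨c, by simp [hc], hceq⟩
      · have hle := (PySem.List.le_foldl_max (ys.map pyDigit) (max f0 (pyDigit y))).1
        rw [List.foldl_map] at hle
        have heq : ys.foldl (fun a c => max a (pyDigit c)) (max f0 (pyDigit y)) = max f0 (pyDigit y) := by
          omega
        rw [heq] at hM ⊢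
        exact ⟨y, by simp, by omega⟩

theorem fused_loop_char (cs : List Char) (f0 i0 : Int) (s : Int) :
    let r := (PySem.List.enumerate cs s).foldl
      (fun (p : Int × Int) ic => if p.1 < pyDigit ic.2 then (pyDigit ic.2, ic.1) else p) (f0, i0)
    r.1 = cs.foldl (fun a c => max a (pyDigit c)) f0 ∧
    ((∀ c ∈ cs, pyDigit c ≤ f0) → r = (f0, i0)) ∧
    ((∃ c ∈ cs, f0 < pyDigit c) →
      r.2 = s + (((cs.findIdx? (fun c => pyDigit c == r.1)).getD 0 : Nat) : Int)) := by
  induction cs generalizing f0 i0 s with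
  | nil => simp [PySem.List.enumerate]
  | cons x xs ih =>
      rw [PySem.List.enumerate_cons]
      simp only [List.foldl_cons]
      by_cases hx : f0 < pyDigit x
      · simp only [hx, if_pos]
        obtain ⟨h1, h2, h3⟩ := ih (pyDigit x) s (s + 1)
        refine ⟨by rw [h1]; congr 1; omega, ?_, ?_⟩
        · intro hall
          exact absurd (hall x (by simp)) (by omega)
        · intro _
          rw [h1]
          have hseed : max f0 (pyDigit x) = pyDigit x := by omega
          by_cases hex : ∃ c ∈ xs, pyDigit x < pyDigit c
          · have h3' := h3 hex
            rw [h1] at h3'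
            rw [h3']
            have hM : pyDigit x < xs.foldl (fun a c => max a (pyDigit c)) (pyDigit x) := by
              obtain ⟨c, hc, hcx⟩ := hex
              have := (PySem.List.le_foldl_max (xs.map pyDigit) (pyDigit x)).2
                (pyDigit c) (List.mem_map_of_mem hc)
              rw [List.foldl_map] at this
              omega
            rw [findIdx_shift x xs _ (by omega) (foldl_max_attained xs (pyDigit x) hM)]
            omega
          · push_neg at hex
            have h2' := h2 (fun c hc => hex c hc)
            rw [h2']
            have hM : xs.foldl (fun a c => max a (pyDigit c)) (pyDigit x) = pyDigit x := by
              rw [← List.foldl_map, foldl_max_of_le]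
              intro v hv
              obtain ⟨c, hc, rfl⟩ := List.mem_map.mp hv
              exact hex c hc
            rw [hM, List.findIdx?_cons]
            simp
      · simp only [hx, if_false]
        obtain ⟨h1, h2, h3⟩ := ih f0 i0 (s + 1)
        have hseed : max f0 (pyDigit x) = f0 := by omega
        refine ⟨by rw [h1, hseed], ?_, ?_⟩
        · intro hall
          exact h2 (fun c hc => hall c (by simp [hc]))
        · rintro ⟨c, hc, hcf⟩
          have hc' : c ∈ xs := by
            cases hc with
            | head => exact absurd hcf hx
            | tail _ h => exact h
          have h3' := h3 ⟨c, hc', hcf⟩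
          rw [h3', h1]
          have hM : f0 < xs.foldl (fun a c => max a (pyDigit c)) f0 := by
            have := (PySem.List.le_foldl_max (xs.map pyDigit) f0).2
              (pyDigit c) (List.mem_map_of_mem hc')
            rw [List.foldl_map] at this
            omega
          rw [findIdx_shift x xs _ (by omega) (foldl_max_attained xs f0 hM)]
          omega

-- per-line agreement --------------------------------------------------------

theorem digit_bounds (line : String) (hdig : line.toList.all Char.isDigit = true) :
    ∀ c ∈ line.toList, 0 ≤ pyDigit c ∧ pyDigit c ≤ 9 := by
  intro c hc
  have hd := List.all_eq_true.mp hdig c hc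
  rw [Char.isDigit] at hd
  simp only [Bool.and_eq_true, decide_eq_true_eq] at hd
  have g1 := UInt32.le_iff_toNat_le.mp hd.1
  have g2 := UInt32.le_iff_toNat_le.mp hd.2
  simp only [show ('0').val.toNat = 48 from rfl, show ('9').val.toNat = 57 from rfl] at g1 g2
  have e1 : c.toNat = c.val.toNat := rfl
  unfold pyDigit
  rw [e1]
  omega

theorem lineA_eq_pm (line : String) (hlen : 2 ≤ line.toList.length)
    (hdig : line.toList.all Char.isDigit = true) :
    lineValueA line = pm (line.toList.map pyDigit) := by
  have hnn := digit_bounds line hdig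
  have hne : line.toList ≠ [] := by intro h; rw [h] at hlen; simp at hlen
  have hdlen : line.toList.dropLast.length = line.toList.length - 1 := List.length_dropLast
  have hdne : line.toList.dropLast ≠ [] := by
    intro h
    have h0 : line.toList.dropLast.length = 0 := by rw [h]; rfl
    omega
  unfold lineValueA
  dsimp only
  rw [PySem.List.slice_to_neg_one]
  obtain ⟨h1, h2, h3⟩ := fused_loop_char line.toList.dropLast 0 0 0
  set r := (PySem.List.enumerate line.toList.dropLast 0).foldl
      (fun (p : Int × Int) ic => if p.1 < pyDigit ic.2 then (pyDigit ic.2, ic.1) else p)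
      ((0 : Int), (0 : Int)) with hr
  set e := line.toList.dropLast.map pyDigit with he
  have hM : r.1 = e.foldl max 0 := by rw [h1, he, List.foldl_map]
  set M := e.foldl max 0 with hMdef
  set k : Nat := (e.findIdx? (fun v => v == M)).getD 0 with hk
  have hnnd : ∀ c ∈ line.toList.dropLast, 0 ≤ pyDigit c ∧ pyDigit c ≤ 9 :=
    fun c hc => hnn c ((List.dropLast_sublist _).subset hc)
  have hidx : r.2 = (k : Int) := by
    by_cases hex : ∃ c ∈ line.toList.dropLast, (0 : Int) < pyDigit c
    · have h3' := h3 hex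
      rw [hM] at h3'
      rw [h3', hk, he, List.findIdx?_map]
      have hcomp : ((fun v => v == M) ∘ pyDigit) = (fun c => pyDigit c == M) := rfl
      rw [hcomp]
      omega
    · push_neg at hex
      have h2' := h2 (fun c hc => hex c hc)
      have hr2 : r.2 = 0 := by rw [h2']
      have hM0 : M = 0 := by
        rw [← hM, h2']
      cases hd : line.toList.dropLast with
      | nil => exact absurd hd hdne
      | cons c t =>
          have hc0 : pyDigit c = 0 := by
            have h1c := (hnnd c (by rw [hd]; simp)).1
            have h2c := hex c (by rw [hd]; simp)
            omega
          have : k = 0 := by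
            rw [hk, he, hd, List.map_cons, List.findIdx?_cons]
            simp [hc0, hM0]
          rw [hr2, this]
          simp
  rw [hM, hidx]
  have hcast : (k : Int) + 1 = ((k + 1 : Nat) : Int) := by push_cast; ring
  rw [hcast, PySem.List.slice_from_natCast]
  have hfold2 : (line.toList.drop (k + 1)).foldl (fun s v => max s (pyDigit v)) 0
      = ((line.toList.map pyDigit).drop (k + 1)).foldl max 0 := by
    rw [← List.map_drop, List.foldl_map]
  rw [hfold2]
  have hsplit : line.toList.map pyDigit = e ++ [pyDigit (line.toList.getLast hne)] := by
    conv_lhs => rw [← List.dropLast_append_getLast hne]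
    simp [he]
  rw [hsplit]
  have hene : e ≠ [] := by
    intro h; rw [he] at h; exact hdne (List.map_eq_nil_iff.mp h)
  have hbnd : ∀ v ∈ e, 0 ≤ v ∧ v ≤ 9 := by
    intro v hv
    rw [he] at hv
    obtain ⟨c, hc, rfl⟩ := List.mem_map.mp hv
    exact hnnd c hc
  have hz := hnn (line.toList.getLast hne) (List.getLast_mem hne)
  exact greedy_eq_pm e (pyDigit (line.toList.getLast hne)) hene hbnd hz.1 hz.2

theorem lineB_eq_pm (line : String) (hlen : 2 ≤ line.toList.length)
    (hdig : line.toList.all Char.isDigit = true) :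
    lineValueB line = pm (line.toList.map pyDigit) := by
  have hnn := digit_bounds line hdig
  obtain ⟨l, x, hlx⟩ : ∃ l x, line.toList = l ++ [x] := by
    rcases List.eq_nil_or_concat line.toList with h | ⟨l, x, h⟩
    · rw [h] at hlen; simp at hlen
    · exact ⟨l, x, by simpa using h⟩
  unfold lineValueB
  dsimp only
  rw [if_neg (by omega), hlx]
  simp only [List.reverse_append, List.reverse_singleton, List.singleton_append]
  rw [List.foldl_reverse]
  have hFi : l.foldr (fun c (p : Int × Int) =>
        (if pyDigit c > p.1 then pyDigit c else p.1, max p.2 (pyDigit c * 10 + p.1)))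
        (pyDigit x, 0) = Fi (l.map pyDigit) (pyDigit x) := by
    rw [Fi, List.foldr_map]
  have hgoal : (l.foldr (fun c (p : Int × Int) =>
        (if pyDigit c > p.1 then pyDigit c else p.1, max p.2 (pyDigit c * 10 + p.1)))
        (pyDigit x, 0)).2 = pm ((l ++ [x]).map pyDigit) := by
    rw [hFi, Fi_snd]
    · simp
    · exact (hnn x (by rw [hlx]; simp)).1
    · intro v hv
      obtain ⟨c, hc, rfl⟩ := List.mem_map.mp hv
      exact (hnn c (by rw [hlx]; simp [hc])).1
  exact hgoal

theorem line_eq (line : String)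
    (h : line.toList.length ≤ 1 ∨ line.toList.all Char.isDigit = true) :
    lineValueA line = lineValueB line := by
  by_cases hlen : 2 ≤ line.toList.length
  · have hdig : line.toList.all Char.isDigit = true := by
      rcases h with h | h
      · omega
      · exact h
    rw [lineA_eq_pm line hlen hdig, lineB_eq_pm line hlen hdig]
  · -- short line: both sides are 0
    have hB : lineValueB line = 0 := by
      unfold lineValueB
      simp only
      rw [if_pos (by omega)]
    rw [hB]
    unfold lineValueA
    cases hcs : line.toList with
    | nil => simp [PySem.List.slice]
    | cons c t =>
        have ht : t = [] := by
          rw [hcs] at hlen; simp at hlen; omega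
        subst ht
        simp [PySem.List.slice]

theorem sum_map_congr (data : List String)
    (h : ∀ l ∈ data, lineValueA l = lineValueB l) :
    (data.map lineValueA).sum = (data.map lineValueB).sum := by
  induction data with
  | nil => rfl
  | cons x xs ih =>
      simp only [List.map_cons, List.sum_cons, h x (by simp),
        ih (fun l hl => h l (by simp [hl]))]

-- ===== VERDICT (by name: the statement is the Claim_ definition above) =====
theorem part1_spec : Claim_equal_part1 := by
  intro data _ hpre
  unfold Spec_part1
  rw [part1_eq_sum, part1_alt_eq_sum]
  apply sum_map_congr
  intro l hl
  apply line_eq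
  have := List.all_eq_true.mp hpre l hl
  rcases Bool.or_eq_true_iff.mp this with h | h
  · left; simpa using h
  · right; exact h
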